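-- pv_equiv track=rewrite | github.com/haolunc/ARC-RL | reference_solutions/solutions/e179c5f4.py | transform
-- ===== SOURCE A (Python) =====
-- def transform(grid):
--
--     W = len(grid)
--     if W == 0:
--         return []
--     H = len(grid[0])
--
--     start_row = 0
--     found = False
--     last_col = grid[W - 1]
--     for i in range(H):
--         if last_col[i] == 1:
--             start_row = i
--             found = True
--             break
--     if not found:
--
--         start_row = 0
--
--     out = [[8 for _ in range(H)] for _ in range(W)]
--
--     r = start_row
--     dir = 1 if H <= 1 or start_row < H - 1 else -1
--
--     for j in range(W - 1, -1, -1):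
--         out[j][r] = 1
--         if j == 0:
--             break
--
--         if r + dir > H - 1 or r + dir < 0:
--             dir = -dir
--         r = r + dir
--
--     return out
-- ===== SOURCE B (Python) =====
-- def transform(grid):
--     W = len(grid)
--     if W == 0:
--         return []
--     H = len(grid[0])
--     last = grid[W - 1]
--     start = next((i for i in range(H) if last[i] == 1), 0)
--     if H == 1:
--         return [[1] for _ in range(W)]
--     d = -1 if start == H - 1 else 1
--     p = 2 * (H - 1)
--     cols = []
--     for j in range(W):
--         phase = (start + d * ((W - 1) - j)) % p
--         row = phase if phase <= H - 1 else p - phase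
--         cols.append([1 if i == row else 8 for i in range(H)])
--     return cols
-- ===== Notes on version B (the rewrite author's own statement) =====
-- stated objective: alternative
-- what changed: A fills the grid by iteratively stepping a (row, direction) bounce state column by column; B computes each column independently with a closed-form triangle-wave reflection (phase = (start + dir*steps) mod 2*(H-1)) and builds the output by a comprehension.
import Mathlib
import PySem

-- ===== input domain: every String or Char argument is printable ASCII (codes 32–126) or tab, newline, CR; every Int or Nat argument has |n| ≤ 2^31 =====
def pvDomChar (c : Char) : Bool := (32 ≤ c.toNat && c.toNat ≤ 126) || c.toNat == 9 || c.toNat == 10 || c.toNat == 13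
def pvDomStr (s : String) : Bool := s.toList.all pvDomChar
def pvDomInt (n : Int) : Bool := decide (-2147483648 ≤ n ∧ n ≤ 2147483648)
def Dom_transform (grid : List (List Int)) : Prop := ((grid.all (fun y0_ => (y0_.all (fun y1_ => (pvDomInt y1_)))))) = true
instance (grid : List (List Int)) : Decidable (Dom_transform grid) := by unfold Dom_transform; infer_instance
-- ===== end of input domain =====

-- B replaces A's stateful diagonal-bounce stepping by a per-column closed-form
-- triangle-wave (modular reflection) formula; objective: alternative algorithm.

-- ===== PORT A =====
-- Python list assignment l[i] = v (negative i counts from the end; out-of-range would be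
-- an IndexError, which Pre_ excludes — the port then leaves the list unchanged).
def pySetPy (l : List Int) (i v : Int) : List Int :=
  let idx := if i < 0 then i + l.length else i
  if 0 ≤ idx ∧ idx < (l.length : Int) then l.set idx.toNat v else l

-- 'for i in range(H): if last[i] == 1: start_row = i; break' (IndexError excluded by Pre_)
def aFindStart (last : List Int) : List Nat → Int
  | [] => 0
  | i :: rest =>
    if (PySem.List.pyGet? last (i : Int)).getD 0 = 1 then (i : Int) else aFindStart last rest

-- 'for j in range(W-1, -1, -1): out[j][r] = 1; if j == 0: break; …'
def aLoop (Hm : Int) : Nat → List (List Int) → Int → Int → List (List Int)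
  | 0, out, r, _d => out.set 0 (pySetPy (out.getD 0 []) r 1)
  | j+1, out, r, d =>
    let out' := out.set (j+1) (pySetPy (out.getD (j+1) []) r 1)
    let d' := if r + d > Hm ∨ r + d < 0 then -d else d
    aLoop Hm j out' (r + d') d'

def transform (grid : List (List Int)) : List (List Int) :=
  let W := grid.length
  if W = 0 then []
  else
    let H := (grid.headD []).length
    let last := grid.getD (W - 1) []
    let start_row := aFindStart last (List.range H)
    let out := List.replicate W (List.replicate H 8)
    let dir : Int := if H ≤ 1 ∨ start_row < (H : Int) - 1 then 1 else -1
    aLoop ((H : Int) - 1) (W - 1) out start_row dir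

-- ===== PORT B =====
-- next((i for i in range(H) if last[i] == 1), 0)
def bFindStart (last : List Int) (H : Nat) : Int :=
  (((List.range H).find? (fun (i : Nat) => (PySem.List.pyGet? last (i : Int)).getD 0 == 1)).map
    (fun (i : Nat) => (i : Int))).getD 0

def transform_alt (grid : List (List Int)) : List (List Int) :=
  let W := grid.length
  if W = 0 then []
  else
    let H := (grid.headD []).length
    let last := grid.getD (W - 1) []
    let start := bFindStart last H
    if H = 1 then List.replicate W [1]
    else
      let d : Int := if start = (H : Int) - 1 then -1 else 1
      let p : Int := 2 * ((H : Int) - 1)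
      (List.range W).map (fun (j : Nat) =>
        let phase := PySem.Int.mod (start + d * (((W : Int) - 1) - (j : Int))) p
        let row := if phase ≤ (H : Int) - 1 then phase else p - phase
        (List.range H).map (fun (i : Nat) => if (i : Int) = row then 1 else 8))

-- ===== PRECONDITION & SPEC =====
-- Pre_ excludes exactly the inputs where A raises IndexError: a non-empty grid whose first
-- row is empty (the write out[j][0] hits an empty column), or whose last row is shorter than
-- the first row and contains no 1 (the start-row scan runs off the last row).
def Pre_transform (grid : List (List Int)) : Prop :=
  grid = [] ∨ (0 < (grid.headD []).length ∧
    ((grid.headD []).length ≤ (grid.getD (grid.length - 1) []).length ∨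
      (1 : Int) ∈ grid.getD (grid.length - 1) []))
instance (grid : List (List Int)) : Decidable (Pre_transform grid) := by
  unfold Pre_transform; infer_instance

def pvWitness_transform : List (List Int) := [[0, 1], [1, 0]]

def Spec_transform (grid : List (List Int)) (out : List (List Int)) : Prop := out = transform_alt grid
instance (grid : List (List Int)) (out : List (List Int)) : Decidable (Spec_transform grid out) := by
  unfold Spec_transform; infer_instance

-- ===== CLAIM (what is proved, stated in full; the proofs are below) =====
def Claim_equal_transform : Prop :=
  ∀ (grid : List (List Int)), Dom_transform grid → Pre_transform grid →
    Spec_transform grid (transform grid)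

-- ===== LEMMAS AND PROOFS =====

-- the loop state step of A: one move of (r, dir)
def stepA (Hm : Int) (s : Int × Int) : Int × Int :=
  let d' := if s.1 + s.2 > Hm ∨ s.1 + s.2 < 0 then -s.2 else s.2
  (s.1 + d', d')

def stateA (Hm : Int) (s : Int × Int) : Nat → Int × Int
  | 0 => s
  | k+1 => stepA Hm (stateA Hm s k)

def pvReflect (Hm φ : Int) : Int := if φ ≤ Hm then φ else 2 * Hm - φ
def pvPhase (Hm start d0 : Int) (k : Nat) : Int := (start + d0 * (k : Int)) % (2 * Hm)

theorem stateA_shift (Hm : Int) (s : Int × Int) : ∀ k, stateA Hm s (k+1) = stateA Hm (stepA Hm s) k := by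
  intro k
  induction k with
  | zero => rfl
  | succ k ih => show stepA Hm (stateA Hm s (k+1)) = _; rw [ih]; rfl

theorem pvEmodStep (p φ d0 : Int) (hp : 0 < p) (h0 : 0 ≤ φ) (h1 : φ < p)
    (hd : d0 = 1 ∨ d0 = -1) :
    (φ + d0) % p =
      if d0 = 1 then (if φ = p - 1 then 0 else φ + 1) else (if φ = 0 then p - 1 else φ - 1) := by
  rcases hd with h | h <;> subst h
  · rw [if_pos rfl]
    by_cases h2 : φ = p - 1
    · rw [if_pos h2, h2]; norm_num
    · rw [if_neg h2, Int.emod_eq_of_lt (by omega) (by omega)]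
  · rw [if_neg (by norm_num)]
    by_cases h2 : φ = 0
    · rw [if_pos h2, h2]
      have h3 : (0 : Int) + -1 = (p - 1) + p * (-1) := by ring
      rw [h3, Int.add_mul_emod_self_left, Int.emod_eq_of_lt (by omega) (by omega)]
    · rw [if_neg h2, Int.emod_eq_of_lt (by omega) (by omega)]
      omega

theorem pvTriStep (Hm d0 φ : Int) (hHm : 1 ≤ Hm) (hd : d0 = 1 ∨ d0 = -1)
    (hφ0 : 0 ≤ φ) (hφ1 : φ < 2 * Hm) :
    stepA Hm (pvReflect Hm ((φ + d0) % (2 * Hm)),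
              pvReflect Hm ((φ + d0) % (2 * Hm)) - pvReflect Hm φ)
      = (pvReflect Hm (((φ + d0) % (2 * Hm) + d0) % (2 * Hm)),
         pvReflect Hm (((φ + d0) % (2 * Hm) + d0) % (2 * Hm)) -
           pvReflect Hm ((φ + d0) % (2 * Hm))) := by
  have hp : 0 < 2 * Hm := by omega
  have hψ0 : 0 ≤ (φ + d0) % (2 * Hm) := Int.emod_nonneg _ (by omega)
  have hψ1 : (φ + d0) % (2 * Hm) < 2 * Hm := Int.emod_lt_of_pos _ hp
  have e1 := pvEmodStep (2 * Hm) φ d0 hp hφ0 hφ1 hd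
  generalize hψ : (φ + d0) % (2 * Hm) = ψ at *
  have e2 := pvEmodStep (2 * Hm) ψ d0 hp hψ0 hψ1 hd
  generalize hχ : (ψ + d0) % (2 * Hm) = χ at *
  unfold stepA pvReflect
  rw [Prod.mk.injEq]
  rcases hd with h | h <;> subst h <;>
    constructor <;> simp only at * <;> split_ifs at e1 e2 ⊢ <;> omega

theorem pvPhase_succ (Hm start d0 : Int) (k : Nat) :
    pvPhase Hm start d0 (k+1) = (pvPhase Hm start d0 k + d0) % (2 * Hm) := by
  unfold pvPhase
  have h : start + d0 * ((k : Int) + 1) = (start + d0 * (k : Int)) + d0 := by ring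
  push_cast
  rw [h, Int.add_emod (start + d0 * (k : Int)) d0, Int.add_emod ((start + d0 * (k : Int)) % (2 * Hm)) d0,
    Int.emod_emod_of_dvd _ dvd_rfl]

theorem stateA_eq (Hm start d0 : Int) (hHm : 1 ≤ Hm) (h0 : 0 ≤ start) (h1 : start ≤ Hm)
    (hd : d0 = if start < Hm then 1 else -1) :
    ∀ k, stateA Hm (start, d0) (k+1)
      = (pvReflect Hm (pvPhase Hm start d0 (k+1)),
         pvReflect Hm (pvPhase Hm start d0 (k+1)) - pvReflect Hm (pvPhase Hm start d0 k)) := by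
  have hp : 0 < 2 * Hm := by omega
  have hd' : d0 = 1 ∨ d0 = -1 := by split at hd <;> simp [hd]
  have hφ0 : pvPhase Hm start d0 0 = start := by
    unfold pvPhase; push_cast; rw [mul_zero, add_zero, Int.emod_eq_of_lt h0 (by omega)]
  intro k
  induction k with
  | zero =>
    show stepA Hm (start, d0) = _
    rw [pvPhase_succ, hφ0]
    have e1 := pvEmodStep (2 * Hm) start d0 hp h0 (by omega) hd'
    generalize hψ : (start + d0) % (2 * Hm) = ψ at *
    unfold stepA pvReflect
    rw [Prod.mk.injEq]
    rcases hd' with h | h <;> rw [h] at e1 hd ⊢ <;>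
      constructor <;> simp only at * <;> split_ifs at e1 hd ⊢ <;> omega
  | succ k ih =>
    show stepA Hm (stateA Hm (start, d0) (k+1)) = _
    rw [ih]
    have hb0 : 0 ≤ pvPhase Hm start d0 k := by
      unfold pvPhase; exact Int.emod_nonneg _ (by omega)
    have hb1 : pvPhase Hm start d0 k < 2 * Hm := by
      unfold pvPhase; exact Int.emod_lt_of_pos _ hp
    have h2 := pvTriStep Hm d0 (pvPhase Hm start d0 k) hHm hd' hb0 hb1
    rw [pvPhase_succ Hm start d0 k, pvPhase_succ Hm start d0 (k+1),
      pvPhase_succ Hm start d0 k]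
    exact h2

theorem stateA_fst (Hm start d0 : Int) (hHm : 1 ≤ Hm) (h0 : 0 ≤ start) (h1 : start ≤ Hm)
    (hd : d0 = if start < Hm then 1 else -1) :
    ∀ k, (stateA Hm (start, d0) k).1 = pvReflect Hm (pvPhase Hm start d0 k) := by
  intro k
  cases k with
  | zero =>
    show start = _
    have hφ0 : pvPhase Hm start d0 0 = start := by
      unfold pvPhase; push_cast; rw [mul_zero, add_zero, Int.emod_eq_of_lt h0 (by omega)]
    rw [hφ0]; unfold pvReflect; rw [if_pos h1]
  | succ k => rw [stateA_eq Hm start d0 hHm h0 h1 hd k]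

theorem aLoop_getElem? (Hm : Int) (base : List Int) :
    ∀ (j : Nat) (out : List (List Int)) (r d : Int) (q : Nat),
      j < out.length → (∀ t, t ≤ j → out[t]? = some base) →
      (aLoop Hm j out r d)[q]? =
        if q ≤ j then some (pySetPy base ((stateA Hm (r, d) (j - q)).1) 1) else out[q]? := by
  intro j
  induction j with
  | zero =>
    intro out r d q hj hrows
    show (out.set 0 (pySetPy (out.getD 0 []) r 1))[q]? = _
    have h0 : out.getD 0 [] = base := by
      have := hrows 0 (le_refl 0); simp [List.getD, this]
    rw [h0]
    by_cases hq : q = 0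
    · subst hq; simp [hj, stateA]
    · rw [if_neg (by omega)]
      simp [Ne.symm hq]
  | succ j ih =>
    intro out r d q hj hrows
    show (aLoop Hm j (out.set (j+1) (pySetPy (out.getD (j+1) []) r 1)) _ _)[q]? = _
    have hb : out.getD (j+1) [] = base := by
      have := hrows (j+1) (le_refl _); simp [List.getD, this]
    rw [hb]
    set out' := out.set (j+1) (pySetPy base r 1) with hout'
    set d' := if r + d > Hm ∨ r + d < 0 then -d else d with hd'
    have hlen : out'.length = out.length := by simp [hout']
    have hrows' : ∀ t, t ≤ j → out'[t]? = some base := by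
      intro t ht
      rw [hout', List.getElem?_set]
      rw [if_neg (by omega)]
      exact hrows t (by omega)
    have hstep : stepA Hm (r, d) = (r + d', d') := by
      unfold stepA; rw [hd']
    rw [ih out' (r + d') d' q (by omega) hrows']
    by_cases hq : q ≤ j
    · rw [if_pos hq, if_pos (by omega)]
      have : j + 1 - q = (j - q) + 1 := by omega
      rw [this, stateA_shift, hstep]
    · by_cases hq2 : q = j + 1
      · subst hq2
        rw [if_neg hq, if_pos (le_refl _)]
        simp only [Nat.sub_self]
        rw [hout', List.getElem?_set, if_pos rfl, if_pos hj]
        rfl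
      · rw [if_neg hq, if_neg (by omega), hout', List.getElem?_set, if_neg (by omega)]

theorem aLoop_length (Hm : Int) :
    ∀ (j : Nat) (out : List (List Int)) (r d : Int), (aLoop Hm j out r d).length = out.length := by
  intro j
  induction j with
  | zero => intro out r d; simp [aLoop]
  | succ j ih => intro out r d; show (aLoop Hm j _ _ _).length = _; rw [ih]; simp

theorem find_eq (last : List Int) :
    ∀ l : List Nat,
      aFindStart last l =
        (((l.find? (fun (i : Nat) => (PySem.List.pyGet? last (i : Int)).getD 0 == 1)).map
          (fun (i : Nat) => (i : Int))).getD 0) := by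
  intro l
  induction l with
  | nil => simp [aFindStart]
  | cons x xs ih =>
    by_cases h : (PySem.List.pyGet? last (x : Int)).getD 0 = 1
    · rw [List.find?_cons_of_pos (by simp only [beq_iff_eq]; exact h)]
      simp only [aFindStart, if_pos h, Option.map_some, Option.getD_some]
    · rw [List.find?_cons_of_neg (by simpa using h)]
      simp only [aFindStart, if_neg h]
      exact ih

theorem find_eq2 (last : List Int) (H : Nat) :
    aFindStart last (List.range H) = bFindStart last H := by
  rw [find_eq]; rfl

theorem find_bounds (last : List Int) (B : Int) (hB : 0 ≤ B) :
    ∀ l : List Nat, (∀ i ∈ l, (i : Int) ≤ B) →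
      0 ≤ aFindStart last l ∧ aFindStart last l ≤ B := by
  intro l
  induction l with
  | nil => intro _; simp [aFindStart]; omega
  | cons x xs ih =>
    intro hmem
    by_cases h : (PySem.List.pyGet? last (x : Int)).getD 0 = 1
    · simp only [aFindStart, if_pos h]
      exact ⟨by positivity, hmem x (by simp)⟩
    · simp only [aFindStart, if_neg h]
      exact ih (fun i hi => hmem i (by simp [hi]))

theorem col_eq (H : Nat) (ρ : Int) (h0 : 0 ≤ ρ) (h1 : ρ < (H : Int)) :
    pySetPy (List.replicate H 8) ρ 1 =
      (List.range H).map (fun (i : Nat) => if (i : Int) = ρ then 1 else 8) := by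
  unfold pySetPy
  simp only [List.length_replicate]
  rw [if_neg (by omega : ¬ ρ < 0), if_pos ⟨h0, h1⟩]
  apply List.ext_getElem
  · simp
  · intro i hi hi2
    rw [List.getElem_map, List.getElem_range, List.getElem_set]
    simp only [List.getElem_replicate]
    rw [List.length_set, List.length_replicate] at hi
    split_ifs with ha hb hb <;> first | rfl | (exfalso; omega)

theorem stateA_h1 (r d : Int) (h : (r, d) = ((0 : Int), (1 : Int)) ∨ (r, d) = (-1, -1)) :
    ∀ k, stateA 0 (r, d) k = (0, 1) ∨ stateA 0 (r, d) k = (-1, -1) := by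
  intro k
  induction k with
  | zero => exact h
  | succ k ih =>
    show stepA 0 (stateA 0 (r, d) k) = _ ∨ stepA 0 (stateA 0 (r, d) k) = _
    rcases ih with h2 | h2 <;> rw [h2] <;> [right; left] <;> decide

theorem mainH1 (W : Nat) (hW : 1 ≤ W) :
    aLoop 0 (W - 1) (List.replicate W (List.replicate 1 8)) 0 1 = List.replicate W [1] := by
  apply List.ext_getElem?
  intro q
  by_cases hq : q < W
  · rw [aLoop_getElem? 0 (List.replicate 1 8) (W - 1) _ 0 1 q
      (by simp only [List.length_replicate]; omega)
      (by intro t ht; simp only [List.getElem?_replicate]; rw [if_pos (by omega)])]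
    rw [if_pos (by omega)]
    have hcol : pySetPy (List.replicate 1 8) ((stateA 0 (0, 1) (W - 1 - q)).1) 1 = [1] := by
      rcases stateA_h1 0 1 (Or.inl rfl) (W - 1 - q) with h | h <;> rw [h] <;> decide
    rw [hcol, List.getElem?_replicate, if_pos hq]
  · rw [List.getElem?_eq_none (by rw [aLoop_length]; simp only [List.length_replicate]; omega),
      List.getElem?_eq_none (by simp only [List.length_replicate]; omega)]

theorem mainH2 (W H : Nat) (last : List Int) (hW : 1 ≤ W) (hH : 2 ≤ H) :
    aLoop ((H : Int) - 1) (W - 1) (List.replicate W (List.replicate H 8))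
        (aFindStart last (List.range H))
        (if H ≤ 1 ∨ aFindStart last (List.range H) < (H : Int) - 1 then 1 else -1)
      = (List.range W).map (fun (j : Nat) =>
          let phase := PySem.Int.mod
            (bFindStart last H +
              (if bFindStart last H = (H : Int) - 1 then -1 else 1) *
                (((W : Int) - 1) - (j : Int))) (2 * ((H : Int) - 1))
          let row := if phase ≤ (H : Int) - 1 then phase else 2 * ((H : Int) - 1) - phase
          (List.range H).map (fun (i : Nat) => if (i : Int) = row then 1 else 8)) := by
  have hfe := find_eq2 last H
  set s := aFindStart last (List.range H) with hsdef
  have hsb : 0 ≤ s ∧ s ≤ (H : Int) - 1 := by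
    refine find_bounds last ((H : Int) - 1) (by omega) (List.range H) ?_
    intro i hi
    rw [List.mem_range] at hi
    omega
  have hHm : 1 ≤ (H : Int) - 1 := by omega
  set Hm := (H : Int) - 1 with hHmdef
  set d0 : Int := if H ≤ 1 ∨ s < Hm then 1 else -1 with hd0
  have hd0' : d0 = if s < Hm then 1 else -1 := by
    rw [hd0]; split_ifs <;> omega
  have hdB : (if bFindStart last H = Hm then (-1 : Int) else 1) = d0 := by
    rw [← hfe, hd0']; split_ifs <;> omega
  apply List.ext_getElem?
  intro q
  by_cases hq : q < W
  · rw [aLoop_getElem? Hm (List.replicate H 8) (W - 1) _ s d0 q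
      (by simp only [List.length_replicate]; omega)
      (by intro t ht; simp only [List.getElem?_replicate]; rw [if_pos (by omega)])]
    rw [if_pos (by omega)]
    rw [List.getElem?_map, List.getElem?_range (by omega)]
    simp only [Option.map_some]
    rw [stateA_fst Hm s d0 hHm hsb.1 hsb.2 hd0' (W - 1 - q)]
    have hp : (0 : Int) < 2 * Hm := by omega
    have hcast : ((W : Int) - 1) - (q : Int) = ((W - 1 - q : Nat) : Int) := by
      push_cast [Nat.cast_sub (by omega : 1 ≤ W), Nat.cast_sub (by omega : q ≤ W - 1)]
      omega
    have hphase : PySem.Int.mod (bFindStart last H +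
        (if bFindStart last H = Hm then (-1 : Int) else 1) * (((W : Int) - 1) - (q : Int)))
          (2 * Hm) = pvPhase Hm s d0 (W - 1 - q) := by
      rw [hdB, ← hfe, hcast, PySem.Int.mod_eq_emod_of_pos hp]
      rfl
    rw [hphase]
    have hρ : 0 ≤ pvReflect Hm (pvPhase Hm s d0 (W - 1 - q)) ∧
        pvReflect Hm (pvPhase Hm s d0 (W - 1 - q)) < (H : Int) := by
      have h1 : 0 ≤ pvPhase Hm s d0 (W - 1 - q) := Int.emod_nonneg _ (by omega)
      have h2 : pvPhase Hm s d0 (W - 1 - q) < 2 * Hm := Int.emod_lt_of_pos _ hp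
      unfold pvReflect
      split_ifs <;> omega
    rw [show pySetPy (List.replicate H 8) (pvReflect Hm (pvPhase Hm s d0 (W - 1 - q))) 1 =
        (List.replicate H (8 : Int)).set (pvReflect Hm (pvPhase Hm s d0 (W - 1 - q))).toNat 1 by
      unfold pySetPy
      simp only [List.length_replicate]
      rw [if_neg (by omega : ¬ _ < (0 : Int)), if_pos ⟨hρ.1, by exact_mod_cast hρ.2⟩]]
    have hce := col_eq H (pvReflect Hm (pvPhase Hm s d0 (W - 1 - q))) hρ.1 hρ.2
    unfold pySetPy at hce
    simp only [List.length_replicate] at hce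
    rw [if_neg (by omega : ¬ _ < (0 : Int)), if_pos ⟨hρ.1, by exact_mod_cast hρ.2⟩] at hce
    rw [hce]
    unfold pvReflect
    rfl
  · rw [List.getElem?_eq_none (by rw [aLoop_length]; simp only [List.length_replicate]; omega),
      List.getElem?_eq_none (by simp only [List.length_map, List.length_range]; omega)]

-- ===== VERDICT (by name: the statement is the Claim_ definition above) =====
theorem transform_spec : Claim_equal_transform := by
  intro grid _ hpre
  unfold Spec_transform
  by_cases hW : grid.length = 0
  · rw [List.eq_nil_of_length_eq_zero hW]
    rfl
  · have hgrid : grid ≠ [] := fun h => hW (by rw [h]; rfl)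
    have hH : 0 < (grid.headD []).length := by
      rcases hpre with h | ⟨h1, _⟩
      · exact absurd h hgrid
      · exact h1
    by_cases hH1 : (grid.headD []).length = 1
    · have hs : aFindStart (grid.getD (grid.length - 1) []) (List.range 1) = 0 := by
        rw [List.range_one]
        show (if _ then ((0 : Nat) : Int) else aFindStart _ []) = 0
        split <;> rfl
      simp only [transform, transform_alt, if_neg hW, hH1]
      rw [hs]
      norm_num
      exact mainH1 grid.length (by omega)
    · simp only [transform, transform_alt, if_neg hW, if_neg hH1]
      exact mainH2 grid.length (grid.headD []).length _ (by omega) (by omega)
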